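-- pv_equiv track=rewrite | github.com/dcragusa/PythonMorsels | 1-9/6. format_ranges/format_ranges.py | prepare_ranges
-- ===== SOURCE A (Python) =====
-- def prepare_ranges(input_list):
--
--     output = []
--     duplicates = []
--
--     start = end = None
--     for num in sorted(input_list):
--         if start is None:
--             start = end = num
--         elif end == num:
--             duplicates.append(num)
--         elif num == end + 1:
--             end = num
--         else:
--             output.append((start, end))
--             start = end = num
--     output.append((start, end))
--     if duplicates:
--         # these are separate ranges that also need to be added in (out of order)
--         output.extend(prepare_ranges(duplicates))
--     # sorted will take care of ordering the ranges after duplicates, if any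
--     return sorted(output)
-- ===== SOURCE B (Python) =====
-- def prepare_ranges(input_list):
--     # Count multiplicities once, sort the distinct values once, then sweep the
--     # distinct values once per multiplicity level, collecting consecutive runs.
--     counts = {}
--     for num in input_list:
--         counts[num] = counts.get(num, 0) + 1
--     values = sorted(counts)
--     depth = max(counts[v] for v in values)
--     output = []
--     for level in range(1, depth + 1):
--         run = None
--         for v in values:
--             if counts[v] < level:
--                 continue
--             if run is None:
--                 run = (v, v)
--             elif v == run[1] + 1:
--                 run = (run[0], v)
--             else:
--                 output.append(run)
--                 run = (v, v)
--         output.append(run)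
--     return sorted(output)
-- ===== Notes on version B (the rewrite author's own statement) =====
-- stated objective: faster
-- what changed: Instead of A's repeated sort-and-recurse on the leftover duplicates (one full pass plus a sort per duplicate layer), B counts multiplicities once, sorts the distinct values once, and sweeps that sorted distinct list once per multiplicity level to collect the consecutive runs, sorting the collected ranges once at the end.
-- outside the precondition, e.g. on prepare_ranges([]): A returns [(None, None)], B raises ValueError
import Mathlib
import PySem

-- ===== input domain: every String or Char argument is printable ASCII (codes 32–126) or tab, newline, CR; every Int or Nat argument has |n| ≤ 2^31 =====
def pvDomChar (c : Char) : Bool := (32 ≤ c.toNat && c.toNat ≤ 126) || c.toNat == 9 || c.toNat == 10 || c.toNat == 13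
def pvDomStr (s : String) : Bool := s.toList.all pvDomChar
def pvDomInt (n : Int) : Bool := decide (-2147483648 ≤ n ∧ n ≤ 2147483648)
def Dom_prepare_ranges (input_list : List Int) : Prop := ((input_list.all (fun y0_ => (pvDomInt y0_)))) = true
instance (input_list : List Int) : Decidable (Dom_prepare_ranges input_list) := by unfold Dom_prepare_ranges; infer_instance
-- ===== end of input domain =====

-- B replaces A's sort-and-recurse on the leftover duplicates by one multiplicity count,
-- one sort of the distinct values, and one sweep per multiplicity level (objective: faster).

-- ===== PORT A =====
-- loop body of A's 'for num in sorted(input_list)'; state = (output, duplicates, start/end)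
def pvStepA (st : List (Int × Int) × List Int × Option (Int × Int)) (num : Int) :
    List (Int × Int) × List Int × Option (Int × Int) :=
  match st with
  | (output, duplicates, none) => (output, duplicates, some (num, num))
  | (output, duplicates, some (s, e)) =>
    if e = num then (output, duplicates ++ [num], some (s, e))
    else if num = e + 1 then (output, duplicates, some (s, num))
    else (output ++ [(s, e)], duplicates, some (num, num))

-- termination helper for prepare_ranges (cited in decreasing_by)
theorem pvFoldA_dups_le (s : List Int) :
    ∀ st : List (Int × Int) × List Int × Option (Int × Int),
      ((List.foldl pvStepA st s).2.1).length ≤ st.2.1.length + s.length := by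
  induction s with
  | nil => intro st; simp
  | cons x t ih =>
    intro st
    have hstep : ((pvStepA st x).2.1).length ≤ st.2.1.length + 1 := by
      rcases st with ⟨o, d, se⟩
      rcases se with _ | ⟨s0, e0⟩ <;> simp [pvStepA]
      split_ifs <;> simp
    calc ((List.foldl pvStepA (pvStepA st x) t).2.1).length
        ≤ ((pvStepA st x).2.1).length + t.length := ih _
      _ ≤ st.2.1.length + 1 + t.length := by omega
      _ = st.2.1.length + (x :: t).length := by simp; omega

theorem pvDupsA_lt (l : List Int)
    (h : ((PySem.List.sorted l (fun x => x) false).foldl pvStepA ([], [], none)).2.1 ≠ []) :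
    ((PySem.List.sorted l (fun x => x) false).foldl pvStepA ([], [], none)).2.1.length < l.length := by
  rcases hs : PySem.List.sorted l (fun x => x) false with _ | ⟨x, t⟩
  · rw [hs] at h; simp at h
  · have hlen : t.length + 1 = l.length := by
      have := PySem.List.length_sorted l (fun x => x) false
      rw [hs] at this; simpa using this
    have hb := pvFoldA_dups_le t (([], [], some (x, x)))
    simp only [List.length_nil] at hb
    have hrw : List.foldl pvStepA ([], [], none) (x :: t)
        = List.foldl pvStepA ([], [], some (x, x)) t := by
      simp [pvStepA]
    rw [hrw]
    omega

def prepare_ranges (input_list : List Int) : List (Int × Int) :=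
  let st := (PySem.List.sorted input_list (fun x => x) false).foldl pvStepA ([], [], none)
  -- Python appends (start, end); start = end = None only on empty input (excluded by Pre_),
  -- where Python's (None, None) is not an Int pair — the none branch just keeps output.
  let output := match st.2.2 with
    | some r => st.1 ++ [r]
    | none => st.1
  let output2 := if _h : st.2.1 = [] then output else output ++ prepare_ranges st.2.1
  PySem.List.sorted2 output2 (fun r => r.1) (fun r => r.2) false
termination_by input_list.length
decreasing_by exact pvDupsA_lt input_list _h

-- ===== PORT B =====
-- loop body of B's inner 'for v in values' (the 'continue' when counts[v] < level,
-- then the run-extension branches); counts[v] is ported as getD v 0: v is always a key.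
def pvStepB' (st : List (Int × Int) × Option (Int × Int)) (v : Int) :
    List (Int × Int) × Option (Int × Int) :=
  match st.2 with
  | none => (st.1, some (v, v))
  | some (s, p) => if v = p + 1 then (st.1, some (s, v)) else (st.1 ++ [(s, p)], some (v, v))

def pvStepB (counts : PySem.Dict Int Int) (level : Int)
    (st : List (Int × Int) × Option (Int × Int)) (v : Int) :
    List (Int × Int) × Option (Int × Int) :=
  if counts.getD v 0 < level then st else pvStepB' st v

-- one iteration of B's 'for level in range(1, depth + 1)'
def pvLevelB (counts : PySem.Dict Int Int) (values : List Int)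
    (output : List (Int × Int)) (level : Int) : List (Int × Int) :=
  let st := values.foldl (pvStepB counts level) (output, none)
  -- run = None after a sweep is unreachable for 1 ≤ level ≤ depth (some value has count ≥ level)
  match st.2 with
  | some r => st.1 ++ [r]
  | none => st.1

def prepare_ranges_alt (input_list : List Int) : List (Int × Int) :=
  let counts := input_list.foldl (fun d num => d.modify num 0 (· + 1)) PySem.Dict.empty
  let values := PySem.List.sorted counts.keys (fun x => x) false
  match PySem.List.max? (values.map (fun v => counts.getD v 0)) (fun x => x) with
  | none => []   -- empty input: Python's max(...) raises ValueError; excluded by Pre_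
  | some depth =>
    PySem.List.sorted2 ((PySem.List.pyRange 1 (depth + 1) 1).foldl (pvLevelB counts values) [])
      (fun r => r.1) (fun r => r.2) false

-- ===== PRECONDITION & SPEC =====
-- Pre_ excludes only the empty list, on which A returns [(None, None)] — not a pair of
-- ints — and B raises ValueError (max of an empty sequence).
def Pre_prepare_ranges (input_list : List Int) : Prop := input_list ≠ []
instance (input_list : List Int) : Decidable (Pre_prepare_ranges input_list) := by
  unfold Pre_prepare_ranges; infer_instance

def pvWitness_prepare_ranges : List Int := [1, 2, 5, 1]

def Spec_prepare_ranges (input_list : List Int) (out : List (Int × Int)) : Prop :=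
  out = prepare_ranges_alt input_list
instance (input_list : List Int) (out : List (Int × Int)) : Decidable (Spec_prepare_ranges input_list out) := by
  unfold Spec_prepare_ranges; infer_instance

-- ===== CLAIM (what is proved, stated in full; the proofs are below) =====
def Claim_equal_prepare_ranges : Prop := ∀ (input_list : List Int), Dom_prepare_ranges input_list →
  Pre_prepare_ranges input_list → Spec_prepare_ranges input_list (prepare_ranges input_list)

-- ===== LEMMAS AND PROOFS =====

-- strict lexicographic order on pairs (what Python's tuple sort orders by)
def pvLexLt (a b : Int × Int) : Prop := a.1 < b.1 ∨ (a.1 = b.1 ∧ a.2 < b.2)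

def pvBef (a b : Int × Int) : Bool :=
  decide (a.1 < b.1) || (!decide (b.1 < a.1) && decide (a.2 < b.2))

theorem pvBef_iff (a b : Int × Int) : pvBef a b = true ↔ pvLexLt a b := by
  simp [pvBef, pvLexLt]
  omega

theorem pvSorted2_eq_foldl (xs : List (Int × Int)) :
    PySem.List.sorted2 xs (fun r => r.1) (fun r => r.2) false
      = xs.foldl (fun acc x => PySem.List.insertBy pvBef x acc) [] := rfl

theorem pvInsertBy_cons (x y : Int × Int) (ys : List (Int × Int)) :
    PySem.List.insertBy pvBef x (y :: ys)
      = if pvBef x y then x :: y :: ys else y :: PySem.List.insertBy pvBef x ys := rfl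

theorem pvInsertBy_pairwise (x : Int × Int) (ys : List (Int × Int))
    (h : ys.Pairwise (fun a b => ¬ pvLexLt b a)) :
    (PySem.List.insertBy pvBef x ys).Pairwise (fun a b => ¬ pvLexLt b a) := by
  induction ys with
  | nil => simp [PySem.List.insertBy]
  | cons y ys ih =>
    rw [pvInsertBy_cons]
    by_cases hb : pvBef x y = true
    · rw [if_pos hb]
      have hxy : pvLexLt x y := (pvBef_iff x y).mp hb
      refine List.pairwise_cons.mpr ⟨?_, h⟩
      intro z hz
      rcases List.mem_cons.mp hz with rfl | hz
      · simp [pvLexLt] at hxy ⊢; omega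
      · have hyz : ¬ pvLexLt z y := (List.pairwise_cons.mp h).1 z hz
        simp [pvLexLt] at hxy hyz ⊢; omega
    · rw [if_neg hb]
      have hnxy : ¬ pvLexLt x y := fun hc => hb ((pvBef_iff x y).mpr hc)
      refine List.pairwise_cons.mpr ⟨?_, ih h.of_cons⟩
      intro z hz
      rcases (PySem.List.mem_insertBy pvBef x z ys).mp hz with rfl | hz
      · exact hnxy
      · exact (List.pairwise_cons.mp h).1 z hz

theorem pvSorted2_pairwise (xs : List (Int × Int)) :
    (PySem.List.sorted2 xs (fun r => r.1) (fun r => r.2) false).Pairwise (fun a b => ¬ pvLexLt b a) := by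
  rw [pvSorted2_eq_foldl]
  suffices hgen : ∀ (acc : List (Int × Int)), acc.Pairwise (fun a b => ¬ pvLexLt b a) →
      (xs.foldl (fun acc x => PySem.List.insertBy pvBef x acc) acc).Pairwise
        (fun a b => ¬ pvLexLt b a) by
    exact hgen [] (by simp)
  induction xs with
  | nil => intro acc h; simpa using h
  | cons x t ih => intro acc h; exact ih _ (pvInsertBy_pairwise x acc h)

theorem pvSorted2_congr {xs ys : List (Int × Int)} (h : xs.Perm ys) :
    PySem.List.sorted2 xs (fun r => r.1) (fun r => r.2) false
      = PySem.List.sorted2 ys (fun r => r.1) (fun r => r.2) false := by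
  apply List.eq_of_perm_of_sorted (le := fun a b => ¬ pvLexLt b a)
  · intro a b _ _ h1 h2
    have hc : a.1 = b.1 ∧ a.2 = b.2 := by simp [pvLexLt] at h1 h2; omega
    exact Prod.ext hc.1 hc.2
  · exact pvSorted2_pairwise xs
  · exact pvSorted2_pairwise ys
  · exact ((PySem.List.sorted2_perm xs _ _ false).trans h).trans
      (PySem.List.sorted2_perm ys _ _ false).symm

theorem pvStrictEq {xs ys : List Int} (hx : xs.Pairwise (· < ·)) (hy : ys.Pairwise (· < ·))
    (hm : ∀ v, v ∈ xs ↔ v ∈ ys) : xs = ys := by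
  have hnx : xs.Nodup := hx.imp (fun h => ne_of_lt h)
  have hny : ys.Nodup := hy.imp (fun h => ne_of_lt h)
  have hperm : xs.Perm ys := (List.perm_ext_iff_of_nodup hnx hny).mpr hm
  exact List.eq_of_perm_of_sorted (fun a b _ _ h1 h2 => by omega)
    (hx.imp (fun h => le_of_lt h)) (hy.imp (fun h => le_of_lt h)) hperm

-- canonical consecutive-run decomposition of a strictly increasing list
def pvRanges (st en : Int) : List Int → List (Int × Int) × (Int × Int)
  | [] => ([], (st, en))
  | v :: rest =>
    if v = en + 1 then pvRanges st v rest
    else ((st, en) :: (pvRanges v v rest).1, (pvRanges v v rest).2)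

def pvRuns : List Int → List (Int × Int)
  | [] => []
  | h :: t => (pvRanges h h t).1 ++ [(pvRanges h h t).2]

-- distinct values above en of a sorted list, and the leftover duplicates
def pvStrip : Int → List Int → List Int
  | _, [] => []
  | en, x :: t => if x = en then pvStrip en t else x :: pvStrip x t

def pvDups : Int → List Int → List Int
  | _, [] => []
  | en, x :: t => if x = en then x :: pvDups en t else pvDups x t

theorem pvFoldA_eq (s : List Int) : ∀ (st en : Int) (out : List (Int × Int)) (d : List Int),
    s.Pairwise (· ≤ ·) → (∀ x ∈ s, en ≤ x) →
    s.foldl pvStepA (out, d, some (st, en)) =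
      (out ++ (pvRanges st en (pvStrip en s)).1, d ++ pvDups en s,
        some ((pvRanges st en (pvStrip en s)).2)) := by
  induction s with
  | nil => intro st en out d _ _; simp [pvStrip, pvDups, pvRanges]
  | cons x t ih =>
    intro st en out d hp hen
    have hpt : t.Pairwise (· ≤ ·) := hp.of_cons
    have hxt : ∀ y ∈ t, x ≤ y := (List.pairwise_cons.mp hp).1
    by_cases hx : en = x
    · subst hx
      have hstep : pvStepA (out, d, some (st, en)) en = (out, d ++ [en], some (st, en)) := by
        simp [pvStepA]
      rw [List.foldl_cons, hstep, ih st en out (d ++ [en]) hpt hxt]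
      have h1 : pvStrip en (en :: t) = pvStrip en t := by simp [pvStrip]
      have h2 : pvDups en (en :: t) = en :: pvDups en t := by simp [pvDups]
      rw [h1, h2]
      simp
    · have hstrip : pvStrip en (x :: t) = x :: pvStrip x t := by
        simp only [pvStrip, if_neg (fun e : _ = _ => hx e.symm)]
      have hdups : pvDups en (x :: t) = pvDups x t := by
        simp only [pvDups, if_neg (fun e : _ = _ => hx e.symm)]
      by_cases hx1 : x = en + 1
      · have hstep : pvStepA (out, d, some (st, en)) x = (out, d, some (st, x)) := by
          simp only [pvStepA]; rw [if_neg hx, if_pos hx1]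
        rw [List.foldl_cons, hstep, ih st x out d hpt hxt, hstrip, hdups]
        have hr : pvRanges st en (x :: pvStrip x t) = pvRanges st x (pvStrip x t) := by
          simp only [pvRanges, if_pos hx1]
        rw [hr]
      · have hstep : pvStepA (out, d, some (st, en)) x = (out ++ [(st, en)], d, some (x, x)) := by
          simp only [pvStepA]; rw [if_neg hx, if_neg hx1]
        rw [List.foldl_cons, hstep, ih x x (out ++ [(st, en)]) d hpt hxt, hstrip, hdups]
        have hr : pvRanges st en (x :: pvStrip x t)
            = ((st, en) :: (pvRanges x x (pvStrip x t)).1, (pvRanges x x (pvStrip x t)).2) := by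
          simp only [pvRanges, if_neg hx1]
        rw [hr]
        simp

theorem pvFoldB_eq (w : List Int) : ∀ (st en : Int) (out : List (Int × Int)),
    (∀ x ∈ w, en < x) → w.Pairwise (· < ·) →
    w.foldl pvStepB' (out, some (st, en)) =
      (out ++ (pvRanges st en w).1, some ((pvRanges st en w).2)) := by
  induction w with
  | nil => intro st en out _ _; simp [pvRanges]
  | cons x t ih =>
    intro st en out hen hp
    have hpt : t.Pairwise (· < ·) := hp.of_cons
    have hxt : ∀ y ∈ t, x < y := (List.pairwise_cons.mp hp).1
    by_cases hx1 : x = en + 1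
    · have hstep : pvStepB' (out, some (st, en)) x = (out, some (st, x)) := by
        simp only [pvStepB']; rw [if_pos hx1]
      rw [List.foldl_cons, hstep, ih st x out hxt hpt]
      have hr : pvRanges st en (x :: t) = pvRanges st x t := by
        simp only [pvRanges, if_pos hx1]
      rw [hr]
    · have hstep : pvStepB' (out, some (st, en)) x = (out ++ [(st, en)], some (x, x)) := by
        simp only [pvStepB']; rw [if_neg hx1]
      rw [List.foldl_cons, hstep, ih x x (out ++ [(st, en)]) hxt hpt]
      have hr : pvRanges st en (x :: t)
          = ((st, en) :: (pvRanges x x t).1, (pvRanges x x t).2) := by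
        simp only [pvRanges, if_neg hx1]
      rw [hr]
      simp

theorem pvCount_pvDups (s : List Int) : ∀ en, s.Pairwise (· ≤ ·) → (∀ x ∈ s, en ≤ x) →
    ∀ v, (pvDups en s).count v = if v = en then s.count v else s.count v - 1 := by
  induction s with
  | nil => intro en _ _ v; simp [pvDups]
  | cons x t ih =>
    intro en hp hen v
    have hpt : t.Pairwise (· ≤ ·) := hp.of_cons
    have hxt : ∀ y ∈ t, x ≤ y := (List.pairwise_cons.mp hp).1
    have hrec := ih x hpt hxt v
    by_cases hx : x = en
    · subst hx
      have hd : pvDups x (x :: t) = x :: pvDups x t := by simp [pvDups]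
      rw [hd]
      by_cases hv : v = x
      · subst hv
        rw [if_pos rfl] at hrec ⊢
        simp [List.count_cons]
        omega
      · rw [if_neg hv] at hrec ⊢
        simp [List.count_cons, hv, Ne.symm hv]
        omega
    · have hd : pvDups en (x :: t) = pvDups x t := by
        simp only [pvDups, if_neg hx]
      rw [hd]
      have henx : en < x := lt_of_le_of_ne (hen x (by simp)) (fun e : _ = _ => hx e.symm)
      by_cases hv : v = en
      · subst hv
        have hvx : v ≠ x := by omega
        have hvt : v ∉ t := fun hvt => absurd (hxt v hvt) (by omega)
        have hcv : t.count v = 0 := List.count_eq_zero.mpr hvt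
        rw [if_pos rfl]
        rw [if_neg hvx] at hrec
        simp [List.count_cons, hvx, Ne.symm hvx]
        omega
      · rw [if_neg hv]
        by_cases hvx : v = x
        · subst hvx
          rw [if_pos rfl] at hrec
          simp [List.count_cons]
          omega
        · rw [if_neg hvx] at hrec
          simp [List.count_cons, hvx, Ne.symm hvx]
          omega

theorem pvDups_length (s : List Int) : ∀ en, (pvDups en s).length ≤ s.length := by
  induction s with
  | nil => intro en; simp [pvDups]
  | cons x t ih =>
    intro en
    by_cases hx : x = en <;> simp [pvDups, hx]
    · exact ih en
    · exact Nat.le_succ_of_le (ih x)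

theorem pvStrip_spec (s : List Int) : ∀ en, s.Pairwise (· ≤ ·) → (∀ x ∈ s, en ≤ x) →
    (pvStrip en s).Pairwise (· < ·) ∧ (∀ v, v ∈ pvStrip en s ↔ v ∈ s ∧ en < v) := by
  induction s with
  | nil => intro en _ _; simp [pvStrip]
  | cons x t ih =>
    intro en hp hen
    have hpt : t.Pairwise (· ≤ ·) := hp.of_cons
    have hxt : ∀ y ∈ t, x ≤ y := (List.pairwise_cons.mp hp).1
    by_cases hx : x = en
    · subst hx
      have hst : pvStrip x (x :: t) = pvStrip x t := by simp [pvStrip]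
      obtain ⟨h1, h2⟩ := ih x hpt hxt
      rw [hst]
      refine ⟨h1, ?_⟩
      intro v
      rw [h2, List.mem_cons]
      constructor
      · rintro ⟨hv, hlt⟩; exact ⟨Or.inr hv, hlt⟩
      · rintro ⟨hv | hv, hlt⟩
        · omega
        · exact ⟨hv, hlt⟩
    · have henx : en < x := lt_of_le_of_ne (hen x (by simp)) (fun e : _ = _ => hx e.symm)
      have hst : pvStrip en (x :: t) = x :: pvStrip x t := by
        simp only [pvStrip, if_neg hx]
      obtain ⟨h1, h2⟩ := ih x hpt hxt
      rw [hst]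
      constructor
      · exact List.pairwise_cons.mpr ⟨fun y hy => ((h2 y).mp hy).2, h1⟩
      · intro v
        rw [List.mem_cons, List.mem_cons, h2]
        constructor
        · rintro (rfl | ⟨hv, hlt⟩)
          · exact ⟨Or.inl rfl, henx⟩
          · exact ⟨Or.inr hv, by omega⟩
        · rintro ⟨rfl | hv, hlt⟩
          · exact Or.inl rfl
          · rcases eq_or_ne v x with rfl | hne
            · exact Or.inl rfl
            · exact Or.inr ⟨hv, lt_of_le_of_ne (hxt v hv) (fun e : _ = _ => hne e.symm)⟩

-- sorted distinct values of l
def pvVals (l : List Int) : List Int := PySem.List.sorted (PySem.Set.ofList l) (fun x => x) false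

def pvLayers (values : List Int) (cnt : Int → Nat) (m : Nat) : List (Int × Int) :=
  (List.range m).flatMap (fun k => pvRuns (values.filter (fun v => decide (k + 1 ≤ cnt v))))

theorem pvVals_eq (l : List Int) {h : Int} {t : List Int}
    (hs : PySem.List.sorted l (fun x => x) false = h :: t) :
    pvVals l = h :: pvStrip h t := by
  have hsp : (h :: t).Pairwise (· ≤ ·) := by
    have := PySem.List.sorted_pairwise l (fun x => x)
    rw [hs] at this; exact this
  have hpt : t.Pairwise (· ≤ ·) := hsp.of_cons
  have hht : ∀ y ∈ t, h ≤ y := (List.pairwise_cons.mp hsp).1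
  obtain ⟨hstp, hstm⟩ := pvStrip_spec t h hpt hht
  apply pvStrictEq
  · exact PySem.List.sorted_ofList_pairwise_lt l
  · exact List.pairwise_cons.mpr ⟨fun y hy => ((hstm y).mp hy).2, hstp⟩
  · intro v
    have h1 : v ∈ pvVals l ↔ v ∈ l := by
      unfold pvVals
      rw [PySem.List.mem_sorted, PySem.Set.mem_ofList]
    have h2 : v ∈ l ↔ v ∈ h :: t := by
      rw [← hs, PySem.List.mem_sorted]
    rw [h1, h2, List.mem_cons, List.mem_cons, hstm]
    constructor
    · rintro (rfl | hv)
      · exact Or.inl rfl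
      · rcases eq_or_ne v h with rfl | hne
        · exact Or.inl rfl
        · exact Or.inr ⟨hv, lt_of_le_of_ne (hht v hv) (fun e : _ = _ => hne e.symm)⟩
    · rintro (rfl | ⟨hv, _⟩)
      · exact Or.inl rfl
      · exact Or.inr hv

theorem pvFoldl_skip {α β : Type} (p : α → Prop) [DecidablePred p] (f : β → α → β) :
    ∀ (l : List α) (init : β),
      l.foldl (fun acc x => if p x then acc else f acc x) init
        = (l.filter (fun x => decide (¬ p x))).foldl f init := by
  intro l
  induction l with
  | nil => intro init; rfl
  | cons x t ih =>
    intro init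
    by_cases hp : p x <;> simp [hp, List.filter_cons, ih]

theorem pvLevelB_eq (counts : PySem.Dict Int Int) (values : List Int)
    (hv : values.Pairwise (· < ·)) (out : List (Int × Int)) (level : Int) :
    pvLevelB counts values out level
      = out ++ pvRuns (values.filter (fun v => decide (¬ counts.getD v 0 < level))) := by
  unfold pvLevelB
  have hstep : (pvStepB counts level)
      = fun st v => if counts.getD v 0 < level then st else pvStepB' st v := rfl
  rw [hstep, pvFoldl_skip (fun v => counts.getD v 0 < level) pvStepB' values (out, none)]
  have hw : (values.filter (fun v => decide (¬ counts.getD v 0 < level))).Pairwise (· < ·) :=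
    List.Pairwise.sublist (List.filter_sublist) hv
  rcases hwe : values.filter (fun v => decide (¬ counts.getD v 0 < level)) with _ | ⟨h', t'⟩
  · simp [pvRuns]
  · rw [hwe] at hw
    have hpt : t'.Pairwise (· < ·) := hw.of_cons
    have hxt : ∀ y ∈ t', h' < y := (List.pairwise_cons.mp hw).1
    have hfirst : pvStepB' (out, none) h' = (out, some (h', h')) := rfl
    rw [List.foldl_cons, hfirst, pvFoldB_eq t' h' h' out hxt hpt]
    simp [pvRuns]

theorem pvPyRange (m : Nat) :
    PySem.List.pyRange 1 ((m : Int) + 1) 1 = (List.range m).map (fun k : Nat => (k : Int) + 1) := by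
  induction m with
  | zero => rfl
  | succ n ih =>
    have h1 : PySem.List.pyRange 1 ((n : Int) + 1 + 1) 1
        = PySem.List.pyRange 1 ((n : Int) + 1) 1
            ++ PySem.List.pyRange ((n : Int) + 1) ((n : Int) + 1 + 1) 1 :=
      PySem.List.pyRange_one_append 1 _ _ (by omega) (by omega)
    have h2 : PySem.List.pyRange ((n : Int) + 1) ((n : Int) + 1 + 1) 1
        = [(n : Int) + 1] := by
      rw [PySem.List.pyRange_one_cons (by omega)]
      simp [PySem.List.pyRange]
    rw [List.range_succ, List.map_append]
    push_cast
    rw [h1, ih, h2]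
    simp

theorem pvVals_mem (l : List Int) (v : Int) : v ∈ pvVals l ↔ v ∈ l := by
  unfold pvVals; rw [PySem.List.mem_sorted, PySem.Set.mem_ofList]

theorem pvAlt_char (l : List Int) (hl : l ≠ []) :
    ∃ m : Nat, 1 ≤ m ∧ (∀ v ∈ l, l.count v ≤ m) ∧ (∃ v ∈ l, l.count v = m) ∧
      prepare_ranges_alt l
        = PySem.List.sorted2 (pvLayers (pvVals l) (fun v => l.count v) m)
            (fun r => r.1) (fun r => r.2) false := by
  have hvp : (pvVals l).Pairwise (· < ·) := PySem.List.sorted_ofList_pairwise_lt l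
  have hmem : ∀ v, v ∈ pvVals l ↔ v ∈ l := by
    intro v; unfold pvVals; rw [PySem.List.mem_sorted, PySem.Set.mem_ofList]
  have hdef : prepare_ranges_alt l
      = match PySem.List.max?
            ((PySem.List.sorted (PySem.Dict.counter l).keys (fun x => x) false).map
              (fun v => (PySem.Dict.counter l).getD v 0)) (fun x => x) with
        | none => []
        | some depth =>
          PySem.List.sorted2
            ((PySem.List.pyRange 1 (depth + 1) 1).foldl
              (pvLevelB (PySem.Dict.counter l)
                (PySem.List.sorted (PySem.Dict.counter l).keys (fun x => x) false)) [])
            (fun r => r.1) (fun r => r.2) false := rfl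
  have hkeys : PySem.List.sorted (PySem.Dict.counter l).keys (fun x => x) false = pvVals l := by
    rw [PySem.Dict.keys_counter]; rfl
  have hmapc : (pvVals l).map (fun v => (PySem.Dict.counter l).getD v 0)
      = (pvVals l).map (fun v => (List.count v l : Int)) :=
    List.map_congr_left (fun v _ => PySem.Dict.getD_counter l v)
  obtain ⟨w, hw⟩ : ∃ w, w ∈ l := by
    cases l with
    | nil => exact absurd rfl hl
    | cons a t => exact ⟨a, by simp⟩
  rcases hM : PySem.List.max? ((pvVals l).map (fun v => (List.count v l : Int))) (fun x => x)
      with _ | depth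
  · exfalso
    have := (PySem.List.max?_eq_none_iff _ _).mp hM
    have hv0 : pvVals l = [] := by
      rcases hvv : pvVals l with _ | ⟨a, t⟩
      · rfl
      · rw [hvv] at this; simp at this
    exact absurd ((hmem w).mpr hw) (by rw [hv0]; simp)
  · have hdm := PySem.List.max?_mem hM
    obtain ⟨v₀, hv₀, hv₀e⟩ := List.mem_map.mp hdm
    have hv₀l : v₀ ∈ l := (hmem v₀).mp hv₀
    refine ⟨List.count v₀ l, ?_, ?_, ⟨v₀, hv₀l, rfl⟩, ?_⟩
    · exact List.count_pos_iff.mpr hv₀l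
    · intro v hv
      have hvmap : ((List.count v l : Int)) ∈
          (pvVals l).map (fun v => (List.count v l : Int)) :=
        List.mem_map.mpr ⟨v, (hmem v).mpr hv, rfl⟩
      have := PySem.List.max?_isMax hM _ hvmap
      rw [← hv₀e] at this
      exact_mod_cast this
    · rw [hdef, hkeys, hmapc]
      simp only [hM]
      rw [← hv₀e]
      rw [pvPyRange (List.count v₀ l)]
      rw [PySem.List.foldl_congr_mem ((List.range (List.count v₀ l)).map
            (fun k : Nat => (k : Int) + 1))
          (pvLevelB (PySem.Dict.counter l) (pvVals l))
          (fun acc level => acc ++ pvRuns ((pvVals l).filter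
            (fun v => decide (¬ (PySem.Dict.counter l).getD v 0 < level)))) []
          (fun acc x _ => pvLevelB_eq (PySem.Dict.counter l) (pvVals l) hvp acc x)]
      rw [PySem.List.foldl_append_eq_flatMap]
      rw [List.flatMap_map]
      unfold pvLayers
      simp only [List.nil_append]
      refine congrArg (fun xs : List (Int × Int) =>
        PySem.List.sorted2 xs (fun r : Int × Int => r.1) (fun r : Int × Int => r.2) false) ?_
      refine congrArg (fun g => List.flatMap g (List.range (List.count v₀ l))) ?_
      funext k
      refine congrArg pvRuns (List.filter_congr ?_)
      intro v _
      rw [PySem.Dict.getD_counter]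
      exact decide_eq_decide.mpr (by omega)

theorem pvMain : ∀ (n : Nat) (l : List Int), l.length ≤ n → l ≠ [] →
    prepare_ranges l = prepare_ranges_alt l := by
  intro n
  induction n with
  | zero =>
    intro l hlen hne
    cases l with
    | nil => exact absurd rfl hne
    | cons a t => simp at hlen
  | succ n ih =>
    intro l hlen hne
    rcases hs : PySem.List.sorted l (fun x => x) false with _ | ⟨h, t⟩
    · exact absurd ((PySem.List.sorted_eq_nil_iff l _ false).mp hs) hne
    have hsp : (h :: t).Pairwise (· ≤ ·) := by
      have := PySem.List.sorted_pairwise l (fun x => x); rw [hs] at this; exact this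
    have hpt : t.Pairwise (· ≤ ·) := hsp.of_cons
    have hht : ∀ y ∈ t, h ≤ y := (List.pairwise_cons.mp hsp).1
    have hlent : t.length + 1 = l.length := by
      have := PySem.List.length_sorted l (fun x => x) false
      rw [hs] at this; simpa using this
    have hcl : ∀ v, List.count v (h :: t) = List.count v l := by
      intro v
      rw [← hs]
      exact (PySem.List.sorted_perm l (fun x => x) false).count_eq v
    have hdc : ∀ v, List.count v (pvDups h t) = List.count v l - 1 := by
      intro v
      have hcd := pvCount_pvDups t h hpt hht v
      have hc := hcl v
      by_cases hv : v = h
      · subst hv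
        rw [if_pos rfl] at hcd
        simp [List.count_cons] at hc
        omega
      · rw [if_neg hv] at hcd
        simp [List.count_cons, hv, Ne.symm hv] at hc
        omega
    have hfoldA : (PySem.List.sorted l (fun x => x) false).foldl pvStepA ([], [], none)
        = ((pvRanges h h (pvStrip h t)).1, pvDups h t, some ((pvRanges h h (pvStrip h t)).2)) := by
      rw [hs, List.foldl_cons]
      rw [show pvStepA ([], [], none) h = ([], [], some (h, h)) from rfl]
      rw [pvFoldA_eq t h h [] [] hpt hht]
      simp
    obtain ⟨m, hm1, hmB, ⟨v₁, hv₁l, hv₁⟩, hBeq⟩ := pvAlt_char l hne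
    by_cases hd : pvDups h t = []
    · -- no duplicates: every count is 1 and B has a single level
      have hm : m = 1 := by
        have h1 := hdc v₁
        rw [hd] at h1
        simp at h1
        omega
      have hlay : pvLayers (pvVals l) (fun v => List.count v l) 1 = pvRuns (pvVals l) := by
        unfold pvLayers
        rw [List.range_one]
        simp only [List.flatMap_cons, List.flatMap_nil, List.append_nil]
        refine congrArg pvRuns ?_
        apply List.filter_eq_self.mpr
        intro v hvv
        have hvl : v ∈ l := (pvVals_mem l v).mp hvv
        have := List.count_pos_iff.mpr hvl
        simp
        omega
      have hAeq : prepare_ranges l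
          = PySem.List.sorted2 (pvRuns (h :: pvStrip h t)) (fun r => r.1) (fun r => r.2) false := by
        rw [prepare_ranges, hfoldA]
        simp [hd, pvRuns]
      rw [hm] at hBeq
      rw [hAeq, hBeq, hlay, pvVals_eq l hs]
    · -- duplicates left over: one more level than their layering
      have hdlen : (pvDups h t).length ≤ n := by
        have := pvDups_length t h
        omega
      have hAB := ih (pvDups h t) hdlen hd
      obtain ⟨md, hmd1, hmdB, ⟨u₀, hu₀d, hu₀⟩, hBdeq⟩ := pvAlt_char (pvDups h t) hd
      have hu₀cd : 1 ≤ List.count u₀ (pvDups h t) := List.count_pos_iff.mpr hu₀d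
      have hu₀l : List.count u₀ l = md + 1 := by
        have := hdc u₀; omega
      have hu₀inl : u₀ ∈ l := List.count_pos_iff.mp (by omega)
      have hm2 : m = md + 1 := by
        have hb1 : md + 1 ≤ m := by
          have := hmB u₀ hu₀inl
          omega
        have hcd1 : List.count v₁ (pvDups h t) = m - 1 := by
          have := hdc v₁; omega
        have hv₁ind : v₁ ∈ pvDups h t := List.count_pos_iff.mp (by omega)
        have := hmdB v₁ hv₁ind
        omega
      have hvalsd : pvVals (pvDups h t)
          = (pvVals l).filter (fun v => decide (1 ≤ List.count v (pvDups h t))) := by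
        apply pvStrictEq
        · exact PySem.List.sorted_ofList_pairwise_lt _
        · exact List.Pairwise.sublist (List.filter_sublist) (PySem.List.sorted_ofList_pairwise_lt l)
        · intro v
          rw [pvVals_mem, List.mem_filter, pvVals_mem]
          constructor
          · intro hvd
            have hcd : 1 ≤ List.count v (pvDups h t) := List.count_pos_iff.mpr hvd
            have hvl : v ∈ l := List.count_pos_iff.mp (by have := hdc v; omega)
            exact ⟨hvl, by simpa using hcd⟩
          · rintro ⟨hvl, hc⟩
            simp only [decide_eq_true_eq] at hc
            exact List.count_pos_iff.mp (by omega)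
      have hlay : pvLayers (pvVals l) (fun v => List.count v l) (md + 1)
          = pvRuns (pvVals l)
            ++ pvLayers (pvVals (pvDups h t)) (fun v => List.count v (pvDups h t)) md := by
        unfold pvLayers
        rw [List.range_succ_eq_map, List.flatMap_cons, List.flatMap_map]
        congr 1
        · refine congrArg pvRuns ?_
          apply List.filter_eq_self.mpr
          intro v hvv
          have hvl : v ∈ l := (pvVals_mem l v).mp hvv
          have := List.count_pos_iff.mpr hvl
          simp
          omega
        · rw [hvalsd]
          refine congrArg (fun g => List.flatMap g (List.range md)) ?_
          funext k
          rw [List.filter_filter]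
          refine congrArg pvRuns (List.filter_congr ?_)
          intro v hvv
          have hdv := hdc v
          rw [← Bool.decide_and]
          exact decide_eq_decide.mpr (by simp only []; omega)
      have hAeq : prepare_ranges l
          = PySem.List.sorted2
              (pvRuns (h :: pvStrip h t) ++ prepare_ranges (pvDups h t))
              (fun r => r.1) (fun r => r.2) false := by
        rw [prepare_ranges, hfoldA]
        simp [hd, pvRuns]
      rw [hAeq, hAB, hBdeq, hBeq, hm2, hlay, pvVals_eq l hs]
      apply pvSorted2_congr
      exact List.Perm.append_left _ (PySem.List.sorted2_perm _ _ _ false)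

-- ===== VERDICT (by name: the statement is the Claim_ definition above) =====
theorem prepare_ranges_spec : Claim_equal_prepare_ranges := by
  intro l _ hpre
  unfold Spec_prepare_ranges
  exact pvMain l.length l le_rfl hpre
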